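-- pv_equiv track=rewrite | github.com/Christon-Ragavan/CAMAT | scripts/xml_parser_17_v01.py | _compute_idx_new_measure_for_multi_parts
-- ===== SOURCE A (Python) =====
-- def _compute_idx_new_measure_for_multi_parts(measure_num_list):
--     idx_new_measure_offsets = []
--     for i, m in enumerate(measure_num_list):
--         if i == 0:
--             m_t = m
--         else:
--             if measure_num_list[i-1] != m:
--                 m_t = m
--             else:
--                 continue
--         idx_new_measure_offsets.append(m_t)
--
--     return idx_new_measure_offsets
-- ===== SOURCE B (Python) =====
-- def _compute_idx_new_measure_for_multi_parts(measure_num_list):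
--     # Divide and conquer: dedup each half recursively, then join the halves,
--     # dropping the right half's first element when it equals the left half's last.
--     def dedup(seg):
--         if len(seg) <= 1:
--             return seg
--         mid = len(seg) // 2
--         left = dedup(seg[:mid])
--         right = dedup(seg[mid:])
--         if left[-1] == right[0]:
--             return left + right[1:]
--         return left + right
--     return dedup(list(measure_num_list))
-- ===== Notes on version B (the rewrite author's own statement) =====
-- stated objective: alternative
-- what changed: Replaces A's indexed left-to-right scan (i==0 special case, list[i-1] lookback, continue) by a divide-and-conquer recursion that dedups each half independently and merges them by dropping the right half's head when it equals the left half's last element.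
import Mathlib
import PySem

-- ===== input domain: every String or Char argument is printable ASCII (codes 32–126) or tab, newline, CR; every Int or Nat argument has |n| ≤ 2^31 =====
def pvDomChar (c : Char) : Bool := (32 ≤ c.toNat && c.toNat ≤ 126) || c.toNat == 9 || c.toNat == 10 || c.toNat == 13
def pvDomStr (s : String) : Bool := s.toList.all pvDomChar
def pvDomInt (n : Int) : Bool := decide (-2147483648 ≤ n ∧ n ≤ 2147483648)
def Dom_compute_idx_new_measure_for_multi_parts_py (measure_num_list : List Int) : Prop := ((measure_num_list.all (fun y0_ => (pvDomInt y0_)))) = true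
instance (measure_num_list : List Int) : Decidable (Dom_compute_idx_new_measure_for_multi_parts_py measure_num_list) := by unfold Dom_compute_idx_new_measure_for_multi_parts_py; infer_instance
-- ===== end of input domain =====

-- B replaces A's indexed left-to-right scan (i==0 case, list[i-1] lookback, continue) by a
-- divide-and-conquer recursion deduping halves and merging at the seam (alternative structure).

-- ===== PORT A =====
-- A's enumerate loop, carrying (index i, accumulator acc) over the remaining elements;
-- the condition reads measure_num_list[i-1] on the ORIGINAL list, exactly as A does
def computeIdxGoA (l : List Int) : Nat → List Int → List Int → List Int
  | _, acc, [] => acc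
  | i, acc, m :: rest =>
    if i = 0 then
      computeIdxGoA l (i + 1) (acc ++ [m]) rest
    else
      if PySem.List.pyGet? l ((i : Int) - 1) ≠ some m then
        computeIdxGoA l (i + 1) (acc ++ [m]) rest
      else
        computeIdxGoA l (i + 1) acc rest

def compute_idx_new_measure_for_multi_parts_py (measure_num_list : List Int) : List Int :=
  computeIdxGoA measure_num_list 0 [] measure_num_list

-- ===== PORT B =====
-- join of the two deduped halves: drop right's head when it equals left's last element
def mergeDedup (a b : List Int) : List Int :=
  match a.getLast?, b with
  | some x, y :: ys => if x = y then a ++ ys else a ++ (y :: ys)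
  | _, _ => a ++ b

-- B's recursive divide-and-conquer dedup
def dcDedup (l : List Int) : List Int :=
  if _h : l.length ≤ 1 then l
  else
    mergeDedup (dcDedup (l.take (l.length / 2))) (dcDedup (l.drop (l.length / 2)))
termination_by l.length
decreasing_by
  · simp only [List.length_take]; omega
  · simp only [List.length_drop]; omega

def compute_idx_new_measure_for_multi_parts_py_alt (measure_num_list : List Int) : List Int :=
  dcDedup measure_num_list

-- ===== PRECONDITION & SPEC =====
def Spec_compute_idx_new_measure_for_multi_parts_py (measure_num_list : List Int) (out : List Int) : Prop := out = compute_idx_new_measure_for_multi_parts_py_alt measure_num_list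
instance (measure_num_list : List Int) (out : List Int) : Decidable (Spec_compute_idx_new_measure_for_multi_parts_py measure_num_list out) := by unfold Spec_compute_idx_new_measure_for_multi_parts_py; infer_instance

-- ===== CLAIM (what is proved, stated in full; the proofs are below) =====
def Claim_equal_compute_idx_new_measure_for_multi_parts_py : Prop := ∀ (measure_num_list : List Int), Dom_compute_idx_new_measure_for_multi_parts_py measure_num_list → Spec_compute_idx_new_measure_for_multi_parts_py measure_num_list (compute_idx_new_measure_for_multi_parts_py measure_num_list)

-- ===== LEMMAS AND PROOFS =====

-- canonical linear dedup, the middle-man both ports are proved equal to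
def gk (prev : Int) : List Int → List Int
  | [] => []
  | x :: xs => if x = prev then gk prev xs else x :: gk x xs

def lin : List Int → List Int
  | [] => []
  | x :: xs => x :: gk x xs

-- last element of a nonempty list, with default for the head position
def lastD (d : Int) : List Int → Int
  | [] => d
  | x :: xs => lastD x xs

theorem getLast?_cons_lastD (xs : List Int) : ∀ (x : Int), (x :: xs).getLast? = some (lastD x xs) := by
  induction xs with
  | nil => intro x; rfl
  | cons y t ih => intro x; rw [List.getLast?_cons_cons, ih y]; rfl

theorem gk_append (xs : List Int) : ∀ (prev : Int) (ys : List Int),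
    gk prev (xs ++ ys) = gk prev xs ++ gk (lastD prev xs) ys := by
  induction xs with
  | nil => intro prev ys; simp [gk, lastD]
  | cons x t ih =>
    intro prev ys
    by_cases h : x = prev
    · subst h; simp [gk, lastD, ih]
    · simp [gk, lastD, h, ih]

theorem gk_lastD (xs : List Int) : ∀ (prev : Int),
    lastD prev (gk prev xs) = lastD prev xs := by
  induction xs with
  | nil => intro prev; rfl
  | cons x t ih =>
    intro prev
    by_cases h : x = prev
    · subst h; simp [gk, lastD, ih]
    · simp [gk, lastD, h, ih]

theorem lin_append (x : Int) (xs : List Int) (y : Int) (ys : List Int) :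
    lin ((x :: xs) ++ (y :: ys)) = mergeDedup (lin (x :: xs)) (lin (y :: ys)) := by
  have hlast : (x :: gk x xs).getLast? = some (lastD x xs) := by
    rw [getLast?_cons_lastD, gk_lastD]
  simp only [lin, List.cons_append, mergeDedup, hlast]
  rw [gk_append xs x (y :: ys)]
  by_cases h : lastD x xs = y
  · have hg : gk (lastD x xs) (y :: ys) = gk y ys := by
      rw [h]; simp [gk]
    rw [if_pos h, hg]
  · have hg : gk (lastD x xs) (y :: ys) = y :: gk y ys := by
      have : ¬ y = lastD x xs := fun hh => h hh.symm
      simp [gk, this]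
    rw [if_neg h, hg]

theorem dcDedup_eq_lin (l : List Int) : dcDedup l = lin l := by
  induction hn : l.length using Nat.strong_induction_on generalizing l with
  | _ n ih =>
  subst hn
  by_cases h : l.length ≤ 1
  · rw [dcDedup]
    simp only [h, dif_pos]
    match l, h with
    | [], _ => rfl
    | [x], _ => simp [lin, gk]
  · have h2 : 2 ≤ l.length := by omega
    rw [dcDedup]
    simp only [h, dif_neg, not_false_iff]
    have hm : 1 ≤ l.length / 2 := by omega
    have hlt : l.length / 2 < l.length := by omega
    have ht := ih (l.take (l.length / 2)).length (by rw [List.length_take]; omega) _ rfl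
    have hd := ih (l.drop (l.length / 2)).length (by rw [List.length_drop]; omega) _ rfl
    rw [ht, hd]
    obtain ⟨x, xs, hx⟩ : ∃ x xs, l.take (l.length / 2) = x :: xs := by
      cases htk : l.take (l.length / 2) with
      | nil => exfalso; have := congrArg List.length htk; rw [List.length_take] at this; simp only [List.length_nil] at this; omega
      | cons a b => exact ⟨a, b, rfl⟩
    obtain ⟨y, ys, hy⟩ : ∃ y ys, l.drop (l.length / 2) = y :: ys := by
      cases hdr : l.drop (l.length / 2) with
      | nil => exfalso; have := congrArg List.length hdr; rw [List.length_drop] at this; simp only [List.length_nil] at this; omega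
      | cons a b => exact ⟨a, b, rfl⟩
    rw [hx, hy, ← lin_append, ← hx, ← hy, List.take_append_drop]

-- loop invariant for A: having consumed the nonempty prefix `front` (last element `prev`),
-- A's loop over the rest produces acc ++ gk prev rest
theorem computeIdxGoA_eq (rest : List Int) : ∀ (front acc : List Int) (prev : Int),
    front.getLast? = some prev →
    computeIdxGoA (front ++ rest) front.length acc rest = acc ++ gk prev rest := by
  induction rest with
  | nil => intro front acc prev _; simp [computeIdxGoA, gk]
  | cons m rest ih =>
    intro front acc prev hlast
    have hfe : front ≠ [] := by intro h; simp [h] at hlast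
    have hpos : 0 < front.length := List.length_pos_iff.mpr hfe
    have hidx : PySem.List.pyGet? (front ++ m :: rest) ((front.length : Int) - 1) = some prev := by
      have h1 : ((front.length : Int) - 1) = ((front.length - 1 : Nat) : Int) := by omega
      rw [h1, PySem.List.pyGet?_natCast]
      rw [List.getElem?_append_left (by omega)]
      rw [← List.getLast?_eq_getElem?]
      exact hlast
    have hstep : ∀ acc', computeIdxGoA (front ++ m :: rest) (front.length + 1) acc' rest
        = acc' ++ gk m rest := by
      intro acc'
      have := ih (front ++ [m]) acc' m (by simp)
      simpa using this
    simp only [computeIdxGoA, Nat.pos_iff_ne_zero.mp hpos, if_false]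
    by_cases hpm : prev = m
    · subst hpm
      rw [if_neg (by simp [hidx]), hstep acc]
      simp [gk]
    · rw [if_pos (by rw [hidx]; simpa using hpm), hstep (acc ++ [m])]
      have hg : gk prev (m :: rest) = m :: gk m rest := by
        have : ¬ m = prev := fun h => hpm (Eq.symm h)
        simp [gk, this]
      rw [hg]
      simp

theorem portA_eq_lin (l : List Int) : compute_idx_new_measure_for_multi_parts_py l = lin l := by
  cases l with
  | nil => rfl
  | cons x xs =>
    show computeIdxGoA (x :: xs) 0 [] (x :: xs) = _
    have h0 : computeIdxGoA (x :: xs) 0 [] (x :: xs) = computeIdxGoA (x :: xs) 1 [x] xs := by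
      simp [computeIdxGoA]
    rw [h0]
    have := computeIdxGoA_eq xs [x] [x] x (by simp)
    simpa [lin] using this

-- ===== VERDICT (by name: the statement is the Claim_ definition above) =====
theorem compute_idx_new_measure_for_multi_parts_py_spec : Claim_equal_compute_idx_new_measure_for_multi_parts_py := by
  intro l _
  unfold Spec_compute_idx_new_measure_for_multi_parts_py compute_idx_new_measure_for_multi_parts_py_alt
  rw [portA_eq_lin, dcDedup_eq_lin]
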